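-- pv_equiv track=rewrite | github.com/cpcosu/AOC23-Solutions | introductiontounix2/sol/solution.py | solve
-- ===== SOURCE A (Python) =====
-- def solve(commands):
--     contents_dict = {}
--     i = 0
--     file_name = ""
--     contents = ""
--     reading_contents = False
--     while i < len(commands):
--         command = commands[i]
--         if i < len(commands) - 1:
--             if reading_contents:
--                 if command == ":wq":
--                     reading_contents = False
--                     contents_dict[file_name] = contents
--                     contents = ""
--                 else:
--                     contents += command + "\n"
--             else:
--                 file_name = command[3:]
--                 reading_contents = True
--         else:
--             file_name = command[4:]
--             return contents_dict[file_name]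
--         i += 1
-- ===== SOURCE B (Python) =====
-- def solve(commands):
--     # group-then-map: split the body into ":wq"-terminated blocks, build the
--     # file table in one grouping pass, then look up the target of the last command
--     *body, last = commands
--     files = {}
--     rest = body
--     while rest:
--         opener, rest = rest[0], rest[1:]
--         if ":wq" not in rest:
--             break  # unterminated block: never written
--         k = rest.index(":wq")
--         files[opener[3:]] = "".join(line + "\n" for line in rest[:k])
--         rest = rest[k + 1:]
--     return files[last[4:]]
-- ===== Notes on version B (the rewrite author's own statement) =====
-- stated objective: alternative
-- what changed: Replaces A's single-pass boolean state machine (reading_contents flag, running contents accumulator) by a group-then-map pass that splits the body into ":wq"-terminated blocks with index/slicing, builds the file table per block, and finally looks up the last command's target.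
-- outside the precondition, e.g. on solve([]): A returns None, B raises ValueError; on solve(['cat x']): A raises KeyError, B raises KeyError
import Mathlib
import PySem

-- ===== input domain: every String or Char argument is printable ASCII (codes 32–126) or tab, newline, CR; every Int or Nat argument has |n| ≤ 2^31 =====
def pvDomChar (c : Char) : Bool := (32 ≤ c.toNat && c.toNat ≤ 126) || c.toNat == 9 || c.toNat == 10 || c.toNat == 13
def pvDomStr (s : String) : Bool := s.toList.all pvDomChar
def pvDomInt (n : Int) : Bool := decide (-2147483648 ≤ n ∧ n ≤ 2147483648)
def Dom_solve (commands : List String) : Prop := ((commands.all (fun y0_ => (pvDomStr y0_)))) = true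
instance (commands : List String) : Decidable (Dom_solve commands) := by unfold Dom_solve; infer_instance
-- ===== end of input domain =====

-- B replaces A's one-pass flag-driven state machine by a group-then-map pass:
-- split the body into ":wq"-terminated blocks, build the file table, look the target up (objective: alternative decomposition, same cost).

-- ===== PORT A =====
-- A's while loop over index i, recursing on the remaining suffix of `commands`
-- (the `[command]` case is exactly `i = len(commands) - 1`). Where Python A
-- returns None (empty list) or raises KeyError (missing key), the port returns
-- "" — both excluded by Pre_solve.
def solveGo (rest : List String) (contentsDict : PySem.Dict String String)
    (fileName contents : String) (readingContents : Bool) : String :=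
  match rest with
  | [] => ""  -- Python falls out of the loop and returns None (excluded by Pre_solve)
  | [command] =>
      -- contents_dict[command[4:]]; KeyError (none) excluded by Pre_solve
      ((contentsDict.get? (PySem.Str.slice command (some 4) none)).getD "")
  | command :: rest' =>
      if readingContents then
        if command == ":wq" then
          solveGo rest' (contentsDict.insert fileName contents) fileName "" false
        else
          solveGo rest' contentsDict fileName (contents ++ command ++ "\n") readingContents
      else
        solveGo rest' contentsDict (PySem.Str.slice command (some 3) none) contents true

def solve (commands : List String) : String :=
  solveGo commands PySem.Dict.empty "" "" false

-- ===== PORT B =====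
-- "".join(line + "\n" for line in ls)
def joinLines (ls : List String) : String :=
  PySem.Str.join "" (ls.map (fun line => line ++ "\n"))

-- B's grouping loop: peel an opener, find its terminating ":wq", store the block.
def buildFiles (rest : List String) (files : PySem.Dict String String) :
    PySem.Dict String String :=
  match rest with
  | [] => files
  | opener :: rest' =>
      match h : PySem.List.index? rest' ":wq" with
      | none => files  -- unterminated block: never written
      | some k =>
          buildFiles (rest'.drop (k + 1))
            (files.insert (PySem.Str.slice opener (some 3) none) (joinLines (rest'.take k)))
termination_by rest.length
decreasing_by simp [List.length_drop]

def solve_alt (commands : List String) : String :=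
  match commands.getLast? with
  | none => ""  -- `*body, last = commands` raises ValueError in Python (excluded by Pre_solve)
  | some last =>
      ((buildFiles commands.dropLast PySem.Dict.empty).get?
        (PySem.Str.slice last (some 4) none)).getD ""

-- ===== PRECONDITION & SPEC =====
-- The file names Python A ever stores (openers of ":wq"-terminated blocks),
-- as one fold over the body; used only to state "the final lookup does not raise KeyError".
def writtenKeys (body : List String) : List String :=
  (body.foldl (fun st x =>
      match st.2 with
      | none => (st.1, some (PySem.Str.slice x (some 3) none))
      | some fn => if x == ":wq" then (st.1 ++ [fn], none) else st)
    (([], none) : List String × Option String)).1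

-- Pre_ excludes exactly the inputs where Python A does not return a String: the
-- empty list (A returns None) and inputs whose final command names a file that
-- was never written with a ":wq"-terminated block (A raises KeyError).
def Pre_solve (commands : List String) : Prop :=
  commands ≠ [] ∧
    PySem.Str.slice (commands.getLastD "") (some 4) none ∈ writtenKeys commands.dropLast
instance (commands : List String) : Decidable (Pre_solve commands) := by
  unfold Pre_solve; infer_instance

def pvWitness_solve : List String := ["vimx", "hello", "world", ":wq", "cat x"]

def Spec_solve (commands : List String) (out : String) : Prop := out = solve_alt commands
instance (commands : List String) (out : String) : Decidable (Spec_solve commands out) := by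
  unfold Spec_solve; infer_instance

-- ===== CLAIM (what is proved, stated in full; the proofs are below) =====
def Claim_equal_solve : Prop :=
  ∀ (commands : List String), Dom_solve commands → Pre_solve commands →
    Spec_solve commands (solve commands)

-- ===== LEMMAS AND PROOFS =====

theorem joinLines_nil : joinLines [] = "" := by
  simp [joinLines, PySem.Str.join, PySem.Chars.join, List.intercalate]

theorem joinLines_cons (l : String) (ls : List String) :
    joinLines (l :: ls) = (l ++ "\n") ++ joinLines ls := by
  unfold joinLines
  simp only [List.map_cons, PySem.Str.join]
  have hchars : PySem.Chars.join [] ((l ++ "\n").toList :: (ls.map (fun line => line ++ "\n")).map String.toList)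
      = (l ++ "\n").toList ++ PySem.Chars.join [] ((ls.map (fun line => line ++ "\n")).map String.toList) := by
    generalize (ls.map (fun line => line ++ "\n")).map String.toList = t
    cases t with
    | nil => simp [PySem.Chars.join, List.intercalate]
    | cons b t2 => rw [PySem.Chars.join_cons_cons]; simp
  rw [show ("" : String).toList = [] from rfl, hchars, String.ofList_append]
  simp

-- one unfolding step of solveGo on a non-final command
theorem solveGo_cons (command : String) (rest : List String) (hr : rest ≠ [])
    (d : PySem.Dict String String) (fn c : String) (reading : Bool) :
    solveGo (command :: rest) d fn c reading =
      if reading then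
        if command == ":wq" then solveGo rest (d.insert fn c) fn "" false
        else solveGo rest d fn (c ++ command ++ "\n") reading
      else solveGo rest d (PySem.Str.slice command (some 3) none) c true := by
  cases rest with
  | nil => cases hr rfl
  | cons a t => rfl

-- Reading mode: scanning the body until the first ":wq" (or the final command).
theorem solveGo_reading (rest' : List String) :
    ∀ (last : String) (d : PySem.Dict String String) (fn c : String),
    solveGo (rest' ++ [last]) d fn c true =
      match PySem.List.index? rest' ":wq" with
      | none => ((d.get? (PySem.Str.slice last (some 4) none)).getD "")
      | some k =>
          solveGo ((rest'.drop (k + 1)) ++ [last])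
            (d.insert fn (c ++ joinLines (rest'.take k))) fn "" false := by
  induction rest' with
  | nil => intro last d fn c; simp [solveGo, PySem.List.index?, List.idxOf?]
  | cons x xs ih =>
      intro last d fn c
      rw [List.cons_append, solveGo_cons x (xs ++ [last]) (by simp) d fn c true]
      by_cases hx : x = ":wq"
      · subst hx
        rw [PySem.List.index?_cons_self]
        simp [joinLines_nil, String.append_empty]
      · rw [PySem.List.index?_cons_of_ne xs hx]
        simp only [if_true, show (x == ":wq") = false by simp [hx], Bool.false_eq_true, if_false]
        rw [ih last d fn (c ++ x ++ "\n")]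
        cases hk : PySem.List.index? xs ":wq" with
        | none => simp
        | some k =>
            simp only [Option.map_some]
            rw [List.take_succ_cons, joinLines_cons]
            simp [String.append_assoc]

-- Not-reading mode against B's grouping loop: strong induction on the body length.
theorem solveGo_buildFiles (n : Nat) :
    ∀ (body : List String), body.length ≤ n →
    ∀ (d : PySem.Dict String String) (last fn : String),
    solveGo (body ++ [last]) d fn "" false =
      ((buildFiles body d).get? (PySem.Str.slice last (some 4) none)).getD "" := by
  induction n with
  | zero =>
      intro body hb d last fn
      have : body = [] := List.eq_nil_of_length_eq_zero (Nat.le_zero.mp hb)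
      subst this
      simp [solveGo, buildFiles]
  | succ n ih =>
      intro body hb d last fn
      cases body with
      | nil => simp [solveGo, buildFiles]
      | cons opener rest' =>
          rw [List.cons_append,
            solveGo_cons opener (rest' ++ [last]) (by simp) d fn "" false]
          simp only [Bool.false_eq_true, if_false]
          rw [solveGo_reading rest' last d (PySem.Str.slice opener (some 3) none) ""]
          cases hk : PySem.List.index? rest' ":wq" with
          | none => rw [buildFiles, hk]
          | some k =>
              have hlen : (rest'.drop (k + 1)).length ≤ n := by
                simp only [List.length_drop]
                have := Nat.le_of_succ_le_succ hb
                simp only [List.length_cons] at hb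
                omega
              simp only [String.empty_append]
              rw [ih (rest'.drop (k + 1)) hlen _ last
                (PySem.Str.slice opener (some 3) none)]
              rw [buildFiles, hk]

-- ===== VERDICT (by name: the statement is the Claim_ definition above) =====
theorem solve_spec : Claim_equal_solve := by
  intro commands _ hpre
  obtain ⟨hne, -⟩ := hpre
  unfold Spec_solve solve solve_alt
  rw [List.getLast?_eq_some_getLast hne]
  have key := solveGo_buildFiles commands.dropLast.length commands.dropLast le_rfl
    PySem.Dict.empty (commands.getLast hne) ""
  rw [List.dropLast_concat_getLast hne] at key
  exact key
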